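-- pv_equiv track=rewrite | github.com/lheun99/elice_study_md | 0305/스택, 큐, 덱/기능 개발.py | solution
-- ===== SOURCE A (Python) =====
-- from math import ceil
--
-- def solution(progresses, speeds):
--     duration = []  # *각 작업의 배포까지 걸리는 기간
--     for process, speed in zip(progresses, speeds):
--         duration.append(ceil((100 - process)/speed))
--         # [5, 10, 1, 1, 20, 1]
--
--     releaseCnt = 1  # 5
--     answer = []
--     for idx in range(len(duration)):
--         # 5 10 (1):10 (1):10 20
--         # (1):20 -> IndexError
--
--         try:
--             # *앞에 있는 기능 배포 기간 < 뒤에 있는 기능 배포 기간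
--             if duration[idx] < duration[idx+1]:
--                 answer.append(releaseCnt)  # *: 앞에 있는 기능(들)을 배포한다
--                 releaseCnt = 1  # *releaseCnt를 1로 바꿔놓는다
--
--             # 5 < 10 -> 5 (releaseCnt = 1 : answer = [1]) 5
--             # 10 < 20 -> (releaseCnt = 3 : answer = [1, 3]) 10 1 1
--
--             # *앞에 있는 기능 배포 기간 >= 뒤에 있는 기능 배포 기간
--             elif duration[idx] >= duration[idx+1]:
--                 # *: 뒤에 있는 기능 배포 기간은 비교에 필요없어지므로,
--                 duration[idx+1] = duration[idx]
--                 # *: 더 큰 앞에 있는 기능 배포 기간과 바꾼다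
--                 # *(뒤에 있는 기능들과의 비교를 위해서)
--
--                 releaseCnt += 1  # *더 작은 수였던 뒤에 있는 기능은 앞의 있는 기능 배포 기간과 같이
--                 # *배포가 가능해지므로 releaseCnt를 +1 해준다
--
--             # 10 > 1 -> releaseCnt = 2
--             # 10 > 1 -> releaseCnt = 3
--             # 20 > 1 -> releaseCnt = 2
--
--         # *마지막 인덱스는 항상 IndexError가 발생한다
--         except IndexError:
--             answer.append(releaseCnt)  # *이전까지의 구해진 releaseCnt를 배포
--             # (1):20  -> (releaseCnt = 2 : answer = [1, 3, 2]) 20 1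
--
--     return answer
-- ===== SOURCE B (Python) =====
-- from math import ceil
--
--
-- def solution(progresses, speeds):
--     # Bucket-count: each job's release day is the running maximum of the
--     # durations so far; count jobs per release day in an insertion-ordered
--     # dict and return its values.
--     counts = {}
--     day = None
--     for p, s in zip(progresses, speeds):
--         d = ceil((100 - p) / s)
--         if day is None or d > day:
--             day = d
--         counts[day] = counts.get(day, 0) + 1
--     return list(counts.values())
-- ===== Notes on version B (the rewrite author's own statement) =====
-- stated objective: alternative
-- what changed: Instead of comparing adjacent entries while mutating the duration array and catching an IndexError on the last index, B assigns each job its release day (the running maximum duration) and tallies jobs per release day in an insertion-ordered dict, returning the dict's values.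
import Mathlib
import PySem

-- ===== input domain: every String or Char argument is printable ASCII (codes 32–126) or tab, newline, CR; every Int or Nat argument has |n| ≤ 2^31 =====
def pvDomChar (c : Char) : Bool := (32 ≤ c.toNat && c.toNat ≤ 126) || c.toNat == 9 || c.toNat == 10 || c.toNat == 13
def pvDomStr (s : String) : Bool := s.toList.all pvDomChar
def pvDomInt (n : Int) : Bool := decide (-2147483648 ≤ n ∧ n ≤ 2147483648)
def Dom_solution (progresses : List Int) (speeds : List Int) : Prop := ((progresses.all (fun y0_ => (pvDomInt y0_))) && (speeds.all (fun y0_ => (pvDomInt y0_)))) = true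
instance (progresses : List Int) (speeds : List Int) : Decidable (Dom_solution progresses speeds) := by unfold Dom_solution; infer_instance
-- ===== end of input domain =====

-- B replaces A's adjacent-compare loop (which mutates the array and catches an IndexError on the
-- last index) by tallying jobs per release day (the running maximum duration) in an
-- insertion-ordered dict and returning its values: an alternative of the same O(n) cost.
-- Equivalence of the RETURN values is proved; A mutates no argument.

-- ===== PORT A =====
-- math.ceil((100-p)/s) : exact integer ceiling; on Dom (|ints| ≤ 2^31) the float quotient
-- is far below 2^53 in magnitude so float rounding never crosses an integer: ceil is exact.
def pyCeil (a b : Int) : Int := -(PySem.Int.floordiv (-a) b)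

-- one iteration of A's `for idx in range(len(duration))` body, state = (duration, releaseCnt, answer)
def solutionStep (st : List Int × Int × List Int) (idx : Int) : List Int × Int × List Int :=
  match PySem.List.pyGet? st.1 (idx + 1) with
  | none => (st.1, st.2.1, st.2.2 ++ [st.2.1])          -- except IndexError: answer.append(releaseCnt)
  | some next =>
    if PySem.List.pyGetD st.1 idx 0 < next then          -- duration[idx] < duration[idx+1]  (idx always in range)
      (st.1, 1, st.2.2 ++ [st.2.1])
    else                                                 -- elif duration[idx] >= duration[idx+1]
      (PySem.List.pySetD st.1 (idx + 1) (PySem.List.pyGetD st.1 idx 0), st.2.1 + 1, st.2.2)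

def solution (progresses : List Int) (speeds : List Int) : List Int :=
  let duration := (progresses.zip speeds).map (fun pr => pyCeil (100 - pr.1) pr.2)
  ((PySem.List.pyRange 0 (PySem.List.len duration) 1).foldl solutionStep (duration, 1, ([] : List Int))).2.2

-- ===== PORT B =====
-- one iteration of B's loop body, state = (counts, day)
def solutionAltStep (st : PySem.Dict Int Int × Option Int) (pr : Int × Int) :
    PySem.Dict Int Int × Option Int :=
  let d := pyCeil (100 - pr.1) pr.2
  let day := match st.2 with
    | none => d                                          -- if day is None or d > day: day = d
    | some m => if m < d then d else m
  (st.1.insert day (st.1.getD day 0 + 1), some day)      -- counts[day] = counts.get(day, 0) + 1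

def solution_alt (progresses : List Int) (speeds : List Int) : List Int :=
  ((progresses.zip speeds).foldl solutionAltStep (PySem.Dict.empty, none)).1.values

-- ===== PRECONDITION & SPEC =====
-- Pre_ excludes exactly the inputs where a zipped speed is 0: there Python A raises ZeroDivisionError.
def Pre_solution (progresses : List Int) (speeds : List Int) : Prop :=
  ∀ pr ∈ progresses.zip speeds, pr.2 ≠ 0
instance (progresses : List Int) (speeds : List Int) : Decidable (Pre_solution progresses speeds) := by
  unfold Pre_solution; infer_instance
def pvWitness_solution : List Int × List Int := ([93, 30, 55], [1, 30, 5])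

def Spec_solution (progresses : List Int) (speeds : List Int) (out : List Int) : Prop := out = solution_alt progresses speeds
instance (progresses : List Int) (speeds : List Int) (out : List Int) : Decidable (Spec_solution progresses speeds out) := by unfold Spec_solution; infer_instance

-- ===== CLAIM (what is proved, stated in full; the proofs are below) =====
def Claim_equal_solution : Prop := ∀ (progresses : List Int) (speeds : List Int), Dom_solution progresses speeds → Pre_solution progresses speeds → Spec_solution progresses speeds (solution progresses speeds)

-- ===== LEMMAS AND PROOFS =====

-- reference grouping: `pvGroups m cnt rest` = the release counts when the current group has
-- leader duration m and already holds cnt jobs, with rest still to be scanned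
def pvGroups (m cnt : Int) : List Int → List Int
  | [] => [cnt]
  | d :: ds => if m < d then cnt :: pvGroups d 1 ds else pvGroups m (cnt + 1) ds

-- ---- A side ----
lemma A_loop (rest : List Int) : ∀ (i : Nat) (dur : List Int) (leader cnt : Int) (ans : List Int),
    dur.drop i = leader :: rest →
    ((PySem.List.pyRange (i : Int) (dur.length : Int) 1).foldl solutionStep (dur, cnt, ans)).2.2
      = ans ++ pvGroups leader cnt rest := by
  induction rest with
  | nil =>
    intro i dur leader cnt ans h
    have hlen : dur.length = i + 1 := by
      have := congrArg List.length h
      simp [List.length_drop] at this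
      omega
    have hi : (i : Int) < (dur.length : Int) := by exact_mod_cast by omega
    rw [PySem.List.pyRange_one_cons hi]
    have hnil : PySem.List.pyRange ((i : Int) + 1) (dur.length : Int) 1 = [] := by
      apply PySem.List.pyRange_one_eq_nil
      exact_mod_cast by omega
    have hget : PySem.List.pyGet? dur ((i : Int) + 1) = none := by
      have : ((i : Int) + 1) = ((i + 1 : Nat) : Int) := by push_cast; ring
      rw [this, PySem.List.pyGet?_natCast]
      simp [hlen]
    simp [List.foldl, hnil, solutionStep, hget, pvGroups]
  | cons d rest' ih =>
    intro i dur leader cnt ans h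
    have hlen : dur.length = i + 2 + rest'.length := by
      have := congrArg List.length h
      simp [List.length_drop] at this
      omega
    have hd1 : dur[i + 1]? = some d := by
      have : (dur.drop i)[1]? = dur[i + 1]? := by
        rw [List.getElem?_drop]
      rw [h] at this; simpa using this.symm
    have hd0 : dur[i]? = some leader := by
      have : (dur.drop i)[0]? = dur[i]? := by
        rw [List.getElem?_drop]; norm_num
      rw [h] at this; simpa using this.symm
    have hi : (i : Int) < (dur.length : Int) := by exact_mod_cast by omega
    rw [PySem.List.pyRange_one_cons hi]
    have hcast : ((i : Int) + 1) = ((i + 1 : Nat) : Int) := by push_cast; ring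
    have hget : PySem.List.pyGet? dur ((i : Int) + 1) = some d := by
      rw [hcast, PySem.List.pyGet?_natCast]; exact hd1
    have hgetD : PySem.List.pyGetD dur (i : Int) 0 = leader := by
      rw [PySem.List.pyGetD_natCast]
      simp [List.getD, hd0]
    simp only [List.foldl, solutionStep, hget, hgetD]
    by_cases hlt : leader < d
    · rw [if_pos hlt]
      have hdrop : dur.drop (i + 1) = d :: rest' := by
        rw [← List.tail_drop, h]; rfl
      have := ih (i + 1) dur d 1 (ans ++ [cnt]) hdrop
      push_cast at this ⊢
      rw [this]
      simp [pvGroups, hlt]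
    · rw [if_neg hlt]
      have hset : PySem.List.pySetD dur ((i : Int) + 1) leader = dur.set (i + 1) leader := by
        rw [hcast, PySem.List.pySetD_natCast]
      rw [hset]
      have hdrop : (dur.set (i + 1) leader).drop (i + 1) = leader :: rest' := by
        rw [List.drop_set]
        simp only [lt_irrefl]
        rw [← List.tail_drop, h]
        simp
      have := ih (i + 1) (dur.set (i + 1) leader) leader (cnt + 1) ans hdrop
      simp only [List.length_set] at this
      push_cast at this ⊢
      rw [this]
      simp [pvGroups, hlt]

-- ---- B side ----
-- B's fold over the zipped pairs is the same fold over the duration list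
def durStep (st : PySem.Dict Int Int × Option Int) (d : Int) :
    PySem.Dict Int Int × Option Int :=
  let day := match st.2 with
    | none => d
    | some m => if m < d then d else m
  (st.1.insert day (st.1.getD day 0 + 1), some day)

lemma mk_getD_last (done : List (Int × Int)) (m cnt : Int)
    (h : ∀ k ∈ done.map Prod.fst, k ≠ m) :
    (PySem.Dict.mk (done ++ [(m, cnt)])).getD m 0 = cnt := by
  induction done with
  | nil => simp [PySem.Dict.getD_eq_get?_getD, PySem.Dict.get?_mk_cons]
  | cons p ps ih =>
    obtain ⟨k0, v0⟩ := p
    have hp : k0 ≠ m := h k0 (by simp)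
    rw [PySem.Dict.getD_eq_get?_getD] at *
    simp only [List.cons_append, PySem.Dict.get?_mk_cons]
    rw [if_neg (by simpa using hp)]
    exact ih (fun k hk => h k (by simp [hk]))

lemma mk_not_contains (L : List (Int × Int)) (d : Int)
    (h : ∀ k ∈ L.map Prod.fst, k ≠ d) :
    (PySem.Dict.mk L).contains d = false := by
  rw [PySem.Dict.contains_eq_decide_mem_keys]
  simp only [PySem.Dict.keys, decide_eq_false_iff_not]
  intro hmem
  exact h d hmem rfl

lemma mk_insert_last (done : List (Int × Int)) (m cnt v : Int)
    (h : ∀ k ∈ done.map Prod.fst, k ≠ m) :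
    (PySem.Dict.mk (done ++ [(m, cnt)])).insert m v = PySem.Dict.mk (done ++ [(m, v)]) := by
  apply PySem.Dict.ext
  have hcont : (PySem.Dict.mk (done ++ [(m, cnt)])).contains m = true := by
    rw [PySem.Dict.contains_eq_decide_mem_keys]
    simp [PySem.Dict.keys]
  rw [PySem.Dict.items_insert_of_contains _ _ hcont]
  show (done ++ [(m, cnt)]).map _ = done ++ [(m, v)]
  rw [List.map_append]
  congr 1
  · have heach : ∀ p ∈ done, (if (p.1 == m) = true then (m, v) else p) = id p := by
      intro p hp
      simp [h p.1 (List.mem_map_of_mem hp)]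
    rw [List.map_congr_left heach, List.map_id]
  · simp

lemma B_loop (rest : List Int) : ∀ (done : List (Int × Int)) (m cnt : Int),
    (∀ k ∈ done.map Prod.fst, k < m) →
    ((rest.foldl durStep (PySem.Dict.mk (done ++ [(m, cnt)]), some m)).1).values
      = done.map Prod.snd ++ pvGroups m cnt rest := by
  induction rest with
  | nil =>
    intro done m cnt _
    simp [pvGroups, PySem.Dict.values]
  | cons d ds ih =>
    intro done m cnt hlt
    simp only [List.foldl]
    by_cases hm : m < d
    · have hne : ∀ k ∈ (done ++ [(m, cnt)]).map Prod.fst, k ≠ d := by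
        intro k hk
        simp only [List.map_append, List.mem_append] at hk
        rcases hk with hk | hk
        · exact ne_of_lt (lt_trans (hlt k hk) hm)
        · simp at hk; subst hk; exact ne_of_lt hm
      have hc := mk_not_contains (done ++ [(m, cnt)]) d hne
      have hins : (PySem.Dict.mk (done ++ [(m, cnt)])).insert d
            ((PySem.Dict.mk (done ++ [(m, cnt)])).getD d 0 + 1)
          = PySem.Dict.mk ((done ++ [(m, cnt)]) ++ [(d, 1)]) := by
        apply PySem.Dict.ext
        rw [PySem.Dict.items_insert_of_not_contains _ _ hc,
            PySem.Dict.getD_of_not_contains _ _ hc]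
        norm_num
      have hstep : durStep (PySem.Dict.mk (done ++ [(m, cnt)]), some m) d
          = (PySem.Dict.mk ((done ++ [(m, cnt)]) ++ [(d, 1)]), some d) := by
        simp only [durStep, if_pos hm]
        rw [hins]
      rw [hstep, ih (done ++ [(m, cnt)]) d 1 (by
        intro k hk
        simp only [List.map_append, List.mem_append] at hk
        rcases hk with hk | hk
        · exact lt_trans (hlt k hk) hm
        · simp at hk; subst hk; exact hm)]
      simp [pvGroups, hm]
    · have hne : ∀ k ∈ done.map Prod.fst, k ≠ m := fun k hk => ne_of_lt (hlt k hk)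
      have hstep : durStep (PySem.Dict.mk (done ++ [(m, cnt)]), some m) d
          = (PySem.Dict.mk (done ++ [(m, cnt + 1)]), some m) := by
        simp only [durStep, if_neg hm]
        rw [mk_getD_last done m cnt hne, mk_insert_last done m cnt (cnt + 1) hne]
      rw [hstep, ih done m (cnt + 1) hlt]
      simp [pvGroups, hm]

-- ===== VERDICT (by name: the statement is the Claim_ definition above) =====
theorem solution_spec : Claim_equal_solution := by
  intro progresses speeds _hdom _hpre
  unfold Spec_solution solution solution_alt
  have hfold : (progresses.zip speeds).foldl solutionAltStep (PySem.Dict.empty, none)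
      = ((progresses.zip speeds).map (fun pr => pyCeil (100 - pr.1) pr.2)).foldl durStep
          (PySem.Dict.empty, none) := by
    rw [List.foldl_map]
    rfl
  rw [hfold]
  set durs := (progresses.zip speeds).map (fun pr => pyCeil (100 - pr.1) pr.2) with hdurs
  clear_value durs
  cases durs with
  | nil => simp [PySem.Dict.empty, PySem.Dict.values]
  | cons d0 ds =>
    dsimp only
    -- A side
    have hA := A_loop ds 0 (d0 :: ds) d0 1 [] (by simp)
    simp only [Nat.cast_zero] at hA
    have hAlen : PySem.List.len (d0 :: ds) = ((d0 :: ds).length : Int) := PySem.List.len_eq _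
    rw [hAlen, hA]
    -- B side: first iteration starts the dict at {d0: 1}
    have hfirst : durStep (PySem.Dict.empty, none) d0
        = (PySem.Dict.mk ([] ++ [(d0, 1)]), some d0) := by
      simp only [durStep]
      apply Prod.ext
      · apply PySem.Dict.ext
        rw [PySem.Dict.items_insert_of_not_contains _ _ (PySem.Dict.contains_empty d0),
            PySem.Dict.getD_empty]
        simp [PySem.Dict.empty]
      · rfl
    simp only [List.foldl]
    rw [hfirst, B_loop ds [] d0 1 (by simp)]
    simp
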